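-- pv_equiv track=rewrite | github.com/christianheerdt/TENDER | app.py | score_tender
-- ===== SOURCE A (Python) =====
-- HARD_KEYWORDS = [
--     "pflege", "pflegekraft", "pflegekräfte", "pflegefachkraft", "pflegefachkräfte",
--     "pflegefachfrau", "pflegefachmann", "altenpflege", "seniorenpflege",
--     "stationäre pflege", "langzeitpflege", "pflegeheim", "pflegedienst",
--     "krankenhaus", "klinik", "universitätsklinikum", "gesundheitswesen",
--     "medizinisches personal", "rettungsdienst", "hebamme",
--     "rekrutierung", "recruiting", "personalgewinnung", "personalvermittlung",
--     "personaldienstleistung", "fachkräftegewinnung", "fachkräftemangel",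
--     "ausländische fachkräfte", "ausland", "international",
--     "anerkennung", "kenntnisprüfung", "anpassungslehrgang", "qualifizierung",
--     "sprachkurs", "deutsch b2", "integration",
--     "nursing", "nurse", "nurses", "geriatric care", "healthcare staffing",
--     "recruitment", "recognition of qualifications",
-- ]
--
-- FALSE_POSITIVE_CONTEXT = [
--     "gebäudepflege", "reinigung", "unterhaltsreinigung", "grünpflege",
--     "straßenpflege", "wartung", "instandhaltung", "facility management",
--     "hausmeister", "gebäudemanagement", "winterdienst", "grünflächenpflege",
-- ]
--
-- BUYER_SIGNALS = [
--     "krankenhaus", "klinik", "universitätsklinikum", "pflegeheim", "pflegedienst",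
--     "senioren", "gesundheitsamt", "landesamt", "sozial", "gesundheit",
--     "diakonie", "caritas", "wohlfahrt", "awo", "drk",
-- ]
--
-- _CORE      = ["pflege", "pflegefach", "krankenhaus", "klinik", "altenpflege",
--               "langzeitpflege", "pflegeheim", "pflegedienst", "nursing", "nurse", "geriatric"]
--
-- _RECRUIT   = ["rekrutierung", "recruit", "personal", "vermittlung",
--               "personaldienst", "staffing", "fachkräfte"]
--
-- _QUAL      = ["anerkennung", "kenntnisprüfung", "anpassungslehrgang",
--               "qualifizierung", "sprachkurs", "deutsch b2", "integration", "recognition"]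
--
-- _NURSING   = ["pflegefach", "krankenhaus", "klinik", "nursing", "nurse", "altenpflege"]
--
-- def _norm(s: str) -> str:
--     return (s or "").lower()
--
-- def _matches(text: str, kws: list) -> list:
--     t = _norm(text)
--     return sorted({k for k in kws if k in t})
--
-- def score_tender(title: str, desc: str, buyer: str) -> tuple:
--     blob   = " ".join([title or "", desc or "", buyer or ""])
--     blob_l = _norm(blob)
--
--     matched = _matches(blob, HARD_KEYWORDS)
--     zero    = {"core": 0, "recruiting": 0, "qualification": 0, "buyer": 0, "penalty": 0}
--     if not matched:
--         return 0, zero, "Low relevance (no match)", []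
--
--     core         = min(40, sum(1 for t in _CORE    if t in blob_l) * 10)
--     recruiting   = min(25, sum(1 for t in _RECRUIT if t in blob_l) * 6)
--     qualification = min(20, sum(1 for t in _QUAL   if t in blob_l) * 5)
--     buyer_fit    = min(15, sum(1 for t in BUYER_SIGNALS if t in _norm(buyer) or t in blob_l) * 5)
--
--     fp_hits = sum(1 for t in FALSE_POSITIVE_CONTEXT if t in blob_l)
--     nursing_present = any(t in blob_l for t in _NURSING)
--     penalty = (-20 if nursing_present else -60) if fp_hits > 0 else 0
--
--     total = max(0, min(100, core + recruiting + qualification + buyer_fit + penalty))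
--
--     if total >= 80 and core >= 20 and recruiting >= 10:
--         category = "Direct nursing recruitment opportunity"
--     elif qualification >= 10 and core >= 10:
--         category = "Training / recognition / qualification"
--     elif total >= 60:
--         category = "Healthcare staffing adjacent"
--     else:
--         category = "Low relevance (likely false positive)"
--
--     bd = {"core": core, "recruiting": recruiting, "qualification": qualification,
--           "buyer": buyer_fit, "penalty": penalty}
--     return total, bd, category, matched
-- ===== SOURCE B (Python) =====
-- HARD_KEYWORDS = [
--     "pflege", "pflegekraft", "pflegekräfte", "pflegefachkraft", "pflegefachkräfte",
--     "pflegefachfrau", "pflegefachmann", "altenpflege", "seniorenpflege",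
--     "stationäre pflege", "langzeitpflege", "pflegeheim", "pflegedienst",
--     "krankenhaus", "klinik", "universitätsklinikum", "gesundheitswesen",
--     "medizinisches personal", "rettungsdienst", "hebamme",
--     "rekrutierung", "recruiting", "personalgewinnung", "personalvermittlung",
--     "personaldienstleistung", "fachkräftegewinnung", "fachkräftemangel",
--     "ausländische fachkräfte", "ausland", "international",
--     "anerkennung", "kenntnisprüfung", "anpassungslehrgang", "qualifizierung",
--     "sprachkurs", "deutsch b2", "integration",
--     "nursing", "nurse", "nurses", "geriatric care", "healthcare staffing",
--     "recruitment", "recognition of qualifications",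
-- ]
--
-- FALSE_POSITIVE_CONTEXT = [
--     "gebäudepflege", "reinigung", "unterhaltsreinigung", "grünpflege",
--     "straßenpflege", "wartung", "instandhaltung", "facility management",
--     "hausmeister", "gebäudemanagement", "winterdienst", "grünflächenpflege",
-- ]
--
-- BUYER_SIGNALS = [
--     "krankenhaus", "klinik", "universitätsklinikum", "pflegeheim", "pflegedienst",
--     "senioren", "gesundheitsamt", "landesamt", "sozial", "gesundheit",
--     "diakonie", "caritas", "wohlfahrt", "awo", "drk",
-- ]
--
-- _CORE      = ["pflege", "pflegefach", "krankenhaus", "klinik", "altenpflege",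
--               "langzeitpflege", "pflegeheim", "pflegedienst", "nursing", "nurse", "geriatric"]
--
-- _RECRUIT   = ["rekrutierung", "recruit", "personal", "vermittlung",
--               "personaldienst", "staffing", "fachkräfte"]
--
-- _QUAL      = ["anerkennung", "kenntnisprüfung", "anpassungslehrgang",
--               "qualifizierung", "sprachkurs", "deutsch b2", "integration", "recognition"]
--
-- _NURSING   = ["pflegefach", "krankenhaus", "klinik", "nursing", "nurse", "altenpflege"]
--
-- # one combined keyword -> (bucket, weight) table; scored in a single pass
-- _TABLE = ([(k, "core", 10) for k in _CORE]
--         + [(k, "recruiting", 6) for k in _RECRUIT]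
--         + [(k, "qualification", 5) for k in _QUAL]
--         + [(k, "buyer", 5) for k in BUYER_SIGNALS])
--
--
-- def score_tender(title: str, desc: str, buyer: str) -> tuple:
--     blob_l = " ".join([title or "", desc or "", buyer or ""]).lower()
--     buyer_l = (buyer or "").lower()
--
--     matched = sorted({k for k in HARD_KEYWORDS if k in blob_l})
--     if not matched:
--         return 0, {"core": 0, "recruiting": 0, "qualification": 0,
--                    "buyer": 0, "penalty": 0}, "Low relevance (no match)", []
--
--     core = recruiting = qualification = buyer_fit = 0
--     for kw, bucket, w in _TABLE:
--         if kw in blob_l or (bucket == "buyer" and kw in buyer_l):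
--             if bucket == "core":
--                 core += w
--             elif bucket == "recruiting":
--                 recruiting += w
--             elif bucket == "qualification":
--                 qualification += w
--             else:
--                 buyer_fit += w
--
--     core = min(40, core)
--     recruiting = min(25, recruiting)
--     qualification = min(20, qualification)
--     buyer_fit = min(15, buyer_fit)
--
--     if any(k in blob_l for k in FALSE_POSITIVE_CONTEXT):
--         penalty = -20 if any(k in blob_l for k in _NURSING) else -60
--     else:
--         penalty = 0
--
--     total = max(0, min(100, core + recruiting + qualification + buyer_fit + penalty))
--
--     if total >= 80 and core >= 20 and recruiting >= 10:
--         category = "Direct nursing recruitment opportunity"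
--     elif qualification >= 10 and core >= 10:
--         category = "Training / recognition / qualification"
--     elif total >= 60:
--         category = "Healthcare staffing adjacent"
--     else:
--         category = "Low relevance (likely false positive)"
--
--     return total, {"core": core, "recruiting": recruiting,
--                    "qualification": qualification, "buyer": buyer_fit,
--                    "penalty": penalty}, category, matched
-- ===== Notes on version B (the rewrite author's own statement) =====
-- stated objective: alternative
-- what changed: Replaces A's four separate per-bucket keyword sums by a single pass over one combined keyword->(bucket,weight) table accumulating uncapped totals (caps applied afterwards), and the false-positive hit count by an any-test; matched list and category cascade unchanged.
import Mathlib
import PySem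

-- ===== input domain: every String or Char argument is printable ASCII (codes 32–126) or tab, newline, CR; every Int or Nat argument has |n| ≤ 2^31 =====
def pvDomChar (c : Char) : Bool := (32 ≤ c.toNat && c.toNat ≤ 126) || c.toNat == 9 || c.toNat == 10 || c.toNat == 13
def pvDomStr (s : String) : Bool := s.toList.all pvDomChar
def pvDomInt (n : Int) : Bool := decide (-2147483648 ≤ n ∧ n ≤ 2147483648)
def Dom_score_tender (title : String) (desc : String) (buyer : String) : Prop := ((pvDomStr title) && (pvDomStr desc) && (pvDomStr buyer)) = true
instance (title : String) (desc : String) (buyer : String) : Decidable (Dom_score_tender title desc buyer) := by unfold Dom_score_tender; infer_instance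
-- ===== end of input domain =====

-- B replaces A's four separate capped keyword sums by a single pass over one combined
-- keyword→(bucket,weight) table (caps applied afterwards) and the false-positive count by an any-test;
-- objective: alternative decomposition, same cost.

-- ===== PORT A =====
def pvHARD : List String := [
  "pflege", "pflegekraft", "pflegekräfte", "pflegefachkraft", "pflegefachkräfte",
  "pflegefachfrau", "pflegefachmann", "altenpflege", "seniorenpflege",
  "stationäre pflege", "langzeitpflege", "pflegeheim", "pflegedienst",
  "krankenhaus", "klinik", "universitätsklinikum", "gesundheitswesen",
  "medizinisches personal", "rettungsdienst", "hebamme",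
  "rekrutierung", "recruiting", "personalgewinnung", "personalvermittlung",
  "personaldienstleistung", "fachkräftegewinnung", "fachkräftemangel",
  "ausländische fachkräfte", "ausland", "international",
  "anerkennung", "kenntnisprüfung", "anpassungslehrgang", "qualifizierung",
  "sprachkurs", "deutsch b2", "integration",
  "nursing", "nurse", "nurses", "geriatric care", "healthcare staffing",
  "recruitment", "recognition of qualifications"]

def pvFP : List String := [
  "gebäudepflege", "reinigung", "unterhaltsreinigung", "grünpflege",
  "straßenpflege", "wartung", "instandhaltung", "facility management",
  "hausmeister", "gebäudemanagement", "winterdienst", "grünflächenpflege"]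

def pvBUYER : List String := [
  "krankenhaus", "klinik", "universitätsklinikum", "pflegeheim", "pflegedienst",
  "senioren", "gesundheitsamt", "landesamt", "sozial", "gesundheit",
  "diakonie", "caritas", "wohlfahrt", "awo", "drk"]

def pvCORE : List String := ["pflege", "pflegefach", "krankenhaus", "klinik", "altenpflege",
  "langzeitpflege", "pflegeheim", "pflegedienst", "nursing", "nurse", "geriatric"]

def pvRECRUIT : List String := ["rekrutierung", "recruit", "personal", "vermittlung",
  "personaldienst", "staffing", "fachkräfte"]

def pvQUAL : List String := ["anerkennung", "kenntnisprüfung", "anpassungslehrgang",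
  "qualifizierung", "sprachkurs", "deutsch b2", "integration", "recognition"]

def pvNURSING : List String := ["pflegefach", "krankenhaus", "klinik", "nursing", "nurse", "altenpflege"]

def pvNorm (s : String) : String := PySem.Str.lower s

def pvMatches (text : String) (kws : List String) : List String :=
  let t := pvNorm text
  PySem.List.sorted (PySem.Set.ofList (kws.filter (fun k => PySem.Str.isIn k t))) (fun x => x) false

def score_tender (title : String) (desc : String) (buyer : String) : Int × (List (String × Int)) × String × List String :=
  let blob := PySem.Str.join " " [title, desc, buyer]
  let blob_l := pvNorm blob
  let matched := pvMatches blob pvHARD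
  let zero : List (String × Int) := [("core", 0), ("recruiting", 0), ("qualification", 0), ("buyer", 0), ("penalty", 0)]
  if matched = [] then (0, zero, "Low relevance (no match)", [])
  else
    let core := min 40 (((pvCORE.map (fun t => if PySem.Str.isIn t blob_l then (1 : Int) else 0)).sum) * 10)
    let recruiting := min 25 (((pvRECRUIT.map (fun t => if PySem.Str.isIn t blob_l then (1 : Int) else 0)).sum) * 6)
    let qualification := min 20 (((pvQUAL.map (fun t => if PySem.Str.isIn t blob_l then (1 : Int) else 0)).sum) * 5)
    let buyer_fit := min 15 (((pvBUYER.map (fun t => if PySem.Str.isIn t (pvNorm buyer) || PySem.Str.isIn t blob_l then (1 : Int) else 0)).sum) * 5)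
    let fp_hits := (pvFP.map (fun t => if PySem.Str.isIn t blob_l then (1 : Int) else 0)).sum
    let nursing_present := pvNURSING.any (fun t => PySem.Str.isIn t blob_l)
    let penalty : Int := if 0 < fp_hits then (if nursing_present then -20 else -60) else 0
    let total := max 0 (min 100 (core + recruiting + qualification + buyer_fit + penalty))
    let category :=
      if total ≥ 80 ∧ core ≥ 20 ∧ recruiting ≥ 10 then "Direct nursing recruitment opportunity"
      else if qualification ≥ 10 ∧ core ≥ 10 then "Training / recognition / qualification"
      else if total ≥ 60 then "Healthcare staffing adjacent"
      else "Low relevance (likely false positive)"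
    let bd : List (String × Int) := [("core", core), ("recruiting", recruiting), ("qualification", qualification), ("buyer", buyer_fit), ("penalty", penalty)]
    (total, bd, category, matched)

-- ===== PORT B =====
def pvTable : List (String × String × Int) :=
  pvCORE.map (fun k => (k, "core", (10 : Int)))
  ++ pvRECRUIT.map (fun k => (k, "recruiting", (6 : Int)))
  ++ pvQUAL.map (fun k => (k, "qualification", (5 : Int)))
  ++ pvBUYER.map (fun k => (k, "buyer", (5 : Int)))

def pvStep (blob_l : String) (buyer_l : String) (st : Int × Int × Int × Int) (e : String × String × Int) : Int × Int × Int × Int :=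
  if PySem.Str.isIn e.1 blob_l || (e.2.1 == "buyer" && PySem.Str.isIn e.1 buyer_l) then
    if e.2.1 == "core" then (st.1 + e.2.2, st.2.1, st.2.2.1, st.2.2.2)
    else if e.2.1 == "recruiting" then (st.1, st.2.1 + e.2.2, st.2.2.1, st.2.2.2)
    else if e.2.1 == "qualification" then (st.1, st.2.1, st.2.2.1 + e.2.2, st.2.2.2)
    else (st.1, st.2.1, st.2.2.1, st.2.2.2 + e.2.2)
  else st

def score_tender_alt (title : String) (desc : String) (buyer : String) : Int × (List (String × Int)) × String × List String :=
  let blob_l := PySem.Str.lower (PySem.Str.join " " [title, desc, buyer])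
  let buyer_l := PySem.Str.lower buyer
  let matched := PySem.List.sorted (PySem.Set.ofList (pvHARD.filter (fun k => PySem.Str.isIn k blob_l))) (fun x => x) false
  if matched = [] then
    (0, [("core", 0), ("recruiting", 0), ("qualification", 0), ("buyer", 0), ("penalty", 0)], "Low relevance (no match)", [])
  else
    let t := pvTable.foldl (pvStep blob_l buyer_l) (0, 0, 0, 0)
    let core := min 40 t.1
    let recruiting := min 25 t.2.1
    let qualification := min 20 t.2.2.1
    let buyer_fit := min 15 t.2.2.2
    let penalty : Int :=
      if pvFP.any (fun k => PySem.Str.isIn k blob_l) then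
        (if pvNURSING.any (fun k => PySem.Str.isIn k blob_l) then -20 else -60)
      else 0
    let total := max 0 (min 100 (core + recruiting + qualification + buyer_fit + penalty))
    let category :=
      if total ≥ 80 ∧ core ≥ 20 ∧ recruiting ≥ 10 then "Direct nursing recruitment opportunity"
      else if qualification ≥ 10 ∧ core ≥ 10 then "Training / recognition / qualification"
      else if total ≥ 60 then "Healthcare staffing adjacent"
      else "Low relevance (likely false positive)"
    (total, [("core", core), ("recruiting", recruiting), ("qualification", qualification), ("buyer", buyer_fit), ("penalty", penalty)], category, matched)

-- ===== PRECONDITION & SPEC =====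
def Spec_score_tender (title : String) (desc : String) (buyer : String) (out : Int × (List (String × Int)) × String × List String) : Prop := out = score_tender_alt title desc buyer
instance (title : String) (desc : String) (buyer : String) (out : Int × (List (String × Int)) × String × List String) : Decidable (Spec_score_tender title desc buyer out) := by unfold Spec_score_tender; infer_instance

-- ===== CLAIM (what is proved, stated in full; the proofs are below) =====
def Claim_equal_score_tender : Prop := ∀ (title : String) (desc : String) (buyer : String), Dom_score_tender title desc buyer → Spec_score_tender title desc buyer (score_tender title desc buyer)

-- ===== LEMMAS AND PROOFS =====

theorem fold_core (bl byl : String) (ks : List String) (c r q b : Int) :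
    (ks.map (fun k => (k, "core", (10 : Int)))).foldl (pvStep bl byl) (c, r, q, b)
      = (c + ((ks.map (fun t => if PySem.Str.isIn t bl then (1 : Int) else 0)).sum) * 10, r, q, b) := by
  induction ks generalizing c with
  | nil => simp
  | cons k ks ih =>
    simp only [List.map_cons, List.foldl_cons, List.sum_cons, pvStep]
    cases h : PySem.Str.isIn k bl <;> (simp [ih]; try ring)

theorem fold_recruit (bl byl : String) (ks : List String) (c r q b : Int) :
    (ks.map (fun k => (k, "recruiting", (6 : Int)))).foldl (pvStep bl byl) (c, r, q, b)
      = (c, r + ((ks.map (fun t => if PySem.Str.isIn t bl then (1 : Int) else 0)).sum) * 6, q, b) := by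
  induction ks generalizing r with
  | nil => simp
  | cons k ks ih =>
    simp only [List.map_cons, List.foldl_cons, List.sum_cons, pvStep]
    cases h : PySem.Str.isIn k bl <;> (simp [ih]; try ring)

theorem fold_qual (bl byl : String) (ks : List String) (c r q b : Int) :
    (ks.map (fun k => (k, "qualification", (5 : Int)))).foldl (pvStep bl byl) (c, r, q, b)
      = (c, r, q + ((ks.map (fun t => if PySem.Str.isIn t bl then (1 : Int) else 0)).sum) * 5, b) := by
  induction ks generalizing q with
  | nil => simp
  | cons k ks ih =>
    simp only [List.map_cons, List.foldl_cons, List.sum_cons, pvStep]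
    cases h : PySem.Str.isIn k bl <;> (simp [ih]; try ring)

theorem fold_buyer (bl byl : String) (ks : List String) (c r q b : Int) :
    (ks.map (fun k => (k, "buyer", (5 : Int)))).foldl (pvStep bl byl) (c, r, q, b)
      = (c, r, q, b + ((ks.map (fun t => if PySem.Str.isIn t byl || PySem.Str.isIn t bl then (1 : Int) else 0)).sum) * 5) := by
  induction ks generalizing b with
  | nil => simp
  | cons k ks ih =>
    simp only [List.map_cons, List.foldl_cons, List.sum_cons, pvStep]
    cases h1 : PySem.Str.isIn k bl <;> cases h2 : PySem.Str.isIn k byl <;>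
      (simp [ih]; try ring)

theorem count_pos_iff_any (bl : String) (l : List String) :
    (0 < (l.map (fun t => if PySem.Str.isIn t bl then (1 : Int) else 0)).sum)
      = (l.any (fun k => PySem.Str.isIn k bl) = true) := by
  rw [eq_iff_iff, PySem.List.sum_map_ite_one_zero]
  simp [List.any_eq_true, List.countP_pos_iff]

-- ===== VERDICT (by name: the statement is the Claim_ definition above) =====
theorem score_tender_spec : Claim_equal_score_tender := by
  intro title desc buyer _
  show score_tender title desc buyer = score_tender_alt title desc buyer
  unfold score_tender score_tender_alt pvMatches pvNorm
  simp only [pvTable, List.foldl_append, fold_core, fold_recruit, fold_qual, fold_buyer,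
    count_pos_iff_any, zero_add]
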